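-- pv_equiv track=rewrite | github.com/sgbalogh/esb.py | esb/StatementFeatures.py | __word_within_open_parens
-- ===== SOURCE A (Python) =====
-- def __word_within_open_parens(sentence,i):
--     opened = False
--     for x in range(0,i):
--         if sentence[x] == "(":
--             opened = True
--         elif sentence[x] == ")":
--             opened = False
--     return opened
-- ===== SOURCE B (Python) =====
-- def __word_within_open_parens(sentence, i):
--     # Backward scan: the last paren before i decides; no accumulator.
--     for x in range(i - 1, -1, -1):
--         if sentence[x] == "(":
--             return True
--         if sentence[x] == ")":
--             return False
--     return False
-- ===== Notes on version B (the rewrite author's own statement) =====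
-- stated objective: simpler
-- what changed: Backward scan from i-1 returning at the first parenthesis seen (the last one before i decides), instead of a forward loop maintaining a boolean flag over all of the first i words.
import Mathlib
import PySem

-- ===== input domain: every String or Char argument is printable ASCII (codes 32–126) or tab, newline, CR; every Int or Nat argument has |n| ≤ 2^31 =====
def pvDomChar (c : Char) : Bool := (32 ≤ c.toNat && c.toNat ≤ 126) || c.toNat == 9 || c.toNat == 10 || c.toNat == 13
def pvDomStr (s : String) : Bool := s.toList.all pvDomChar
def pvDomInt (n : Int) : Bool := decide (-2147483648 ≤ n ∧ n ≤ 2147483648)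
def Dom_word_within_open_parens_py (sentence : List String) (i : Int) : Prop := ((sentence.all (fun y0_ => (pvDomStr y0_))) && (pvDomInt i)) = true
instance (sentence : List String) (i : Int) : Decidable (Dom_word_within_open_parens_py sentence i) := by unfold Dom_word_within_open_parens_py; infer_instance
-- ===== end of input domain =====

-- B replaces A's forward scan with a boolean flag by a backward scan that returns
-- at the first parenthesis seen (the last one before i decides).

-- ===== PORT A =====
-- forward loop over range(0, i) maintaining the flag `opened`
def word_within_open_parens_py (sentence : List String) (i : Int) : Bool :=
  (PySem.List.pyRange 0 i 1).foldl (fun opened x =>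
    let w := (PySem.List.pyGet? sentence x).getD ""
    if w = "(" then true
    else if w = ")" then false
    else opened) false

-- ===== PORT B =====
-- backward scan: argument j is (index + 1); j = 0 means the loop finished
def wwop_back (sentence : List String) : Nat → Bool
  | 0 => false
  | j+1 =>
    let w := (PySem.List.pyGet? sentence (Int.ofNat j)).getD ""
    if w = "(" then true
    else if w = ")" then false
    else wwop_back sentence j

def word_within_open_parens_py_alt (sentence : List String) (i : Int) : Bool :=
  wwop_back sentence i.toNat

-- ===== PRECONDITION & SPEC =====
-- A indexes sentence[x] for every 0 ≤ x < i, so it raises IndexError when i > len(sentence)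
def Pre_word_within_open_parens_py (sentence : List String) (i : Int) : Prop :=
  i ≤ (sentence.length : Int)
instance (sentence : List String) (i : Int) : Decidable (Pre_word_within_open_parens_py sentence i) := by unfold Pre_word_within_open_parens_py; infer_instance

def pvWitness_word_within_open_parens_py : List String × Int := (["(", "hi", ")"], 2)

def Spec_word_within_open_parens_py (sentence : List String) (i : Int) (out : Bool) : Prop := out = word_within_open_parens_py_alt sentence i
instance (sentence : List String) (i : Int) (out : Bool) : Decidable (Spec_word_within_open_parens_py sentence i out) := by unfold Spec_word_within_open_parens_py; infer_instance

-- ===== CLAIM (what is proved, stated in full; the proofs are below) =====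
def Claim_equal_word_within_open_parens_py : Prop := ∀ (sentence : List String) (i : Int), Dom_word_within_open_parens_py sentence i → Pre_word_within_open_parens_py sentence i → Spec_word_within_open_parens_py sentence i (word_within_open_parens_py sentence i)

-- ===== LEMMAS AND PROOFS =====

-- the forward fold over range(0, n) computes exactly the backward decision
theorem wwop_fold_eq_back (sentence : List String) (n : Nat) :
    (PySem.List.pyRange 0 (n : Int) 1).foldl (fun opened x =>
      let w := (PySem.List.pyGet? sentence x).getD ""
      if w = "(" then true
      else if w = ")" then false
      else opened) false = wwop_back sentence n := by
  induction n with
  | zero =>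
    rw [show ((0:Nat):Int) = 0 from rfl, PySem.List.pyRange_one_eq_nil le_rfl]
    rfl
  | succ k ih =>
    have h : PySem.List.pyRange 0 ((k : Int) + 1) 1
        = PySem.List.pyRange 0 (k : Int) 1 ++ [(k : Int)] :=
      PySem.List.pyRange_one_succ_right (by positivity)
    push_cast
    rw [h, List.foldl_append, ih]
    simp only [List.foldl, wwop_back, Int.ofNat_eq_natCast]

-- ===== VERDICT (by name: the statement is the Claim_ definition above) =====
theorem word_within_open_parens_py_spec : Claim_equal_word_within_open_parens_py := by
  intro sentence i _ _
  unfold Spec_word_within_open_parens_py word_within_open_parens_py word_within_open_parens_py_alt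
  rcases Int.lt_or_le 0 i with h | h
  · have : i = (i.toNat : Int) := (Int.toNat_of_nonneg h.le).symm
    rw [this]
    exact wwop_fold_eq_back sentence i.toNat
  · rw [PySem.List.pyRange_one_eq_nil h]
    have : i.toNat = 0 := Int.toNat_of_nonpos h
    simp [this, wwop_back]
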